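-- pv_equiv track=rewrite | github.com/TheFenrisLycaon/DSA-C-- | daily_problems/GeeksForGeeks/0322.py | Smallestonleft
-- ===== SOURCE A (Python) =====
-- import bisect
--
-- def Smallestonleft (arr,  n) :
--     res = []
--     listo =[]
--
--     for item in arr:
--         bisect.insort(listo,item)
--         j = bisect.bisect_left(listo,item)
--         if j==0:
--            res.append(-1)
--         else:
--             res.append(listo[j-1])
--
--     return res
-- ===== SOURCE B (Python) =====
-- def Smallestonleft(arr, n):
--     res = []
--     cand = set()
--     lo = hi = hi2 = None
--     for v in arr:
--         if lo is None or v <= lo: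
--             res.append(-1)
--         elif v == hi:
--             res.append(-1 if hi2 is None else hi2)
--         elif hi < v:
--             res.append(hi)
--         else:
--             res.append(max(filter(v.__gt__, cand), default=-1))
--         cand.add(v)
--         if lo is None or v < lo:
--             lo = v
--         if hi is None or hi < v:
--             hi2 = hi
--             hi = v
--         elif v < hi:
--             if hi2 is None or hi2 < v:
--                 hi2 = v
--     return res
-- ===== Notes on version B (the rewrite author's own statement) =====
-- stated objective: alternative
-- what changed: Replaces A's bisect-maintained sorted list and predecessor-index lookup by a set of seen values scanned for the max element below the current one, with running min/max/second-max fast paths that answer monotone or repeated-extreme elements without scanning.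
import Mathlib
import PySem

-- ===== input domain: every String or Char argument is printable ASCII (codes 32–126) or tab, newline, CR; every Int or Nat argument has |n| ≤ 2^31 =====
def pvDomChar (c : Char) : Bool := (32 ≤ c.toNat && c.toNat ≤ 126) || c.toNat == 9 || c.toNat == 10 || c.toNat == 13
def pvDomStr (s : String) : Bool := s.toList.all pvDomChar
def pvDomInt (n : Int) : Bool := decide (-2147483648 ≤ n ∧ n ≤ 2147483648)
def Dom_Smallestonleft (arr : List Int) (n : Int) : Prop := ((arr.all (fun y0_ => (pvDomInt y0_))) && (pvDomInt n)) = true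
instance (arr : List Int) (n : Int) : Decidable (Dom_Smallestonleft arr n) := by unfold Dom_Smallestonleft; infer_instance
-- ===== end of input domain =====

-- B replaces A's bisect-maintained sorted list and predecessor-index lookup by a candidate SET
-- scanned for the max element below the current one, with running min/max/second-max fast paths (alternative algorithm).

-- ===== PORT A =====
-- bisect.insort on a sorted list: insert after equal elements (exact on the sorted lists A feeds it)
def pyInsort : List Int → Int → List Int
  | [], x => [x]
  | h :: t, x => if x < h then x :: h :: t else h :: pyInsort t x

-- bisect.bisect_left on a sorted list: index of the first element ≥ x (exact on the sorted lists A feeds it)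
def pyBisectLeft : List Int → Int → Nat
  | [], _ => 0
  | h :: t, x => if h < x then pyBisectLeft t x + 1 else 0

-- the loop body of A, named so the proofs can speak about one step
def stepA (st : List Int × List Int) (item : Int) : List Int × List Int :=
  let listo := pyInsort st.2 item
  let j := pyBisectLeft listo item
  if j = 0 then (st.1 ++ [-1], listo)
  else (st.1 ++ [(listo[j - 1]?).getD 0], listo)

def Smallestonleft (arr : List Int) (_n : Int) : List Int :=
  (arr.foldl stepA ([], [])).1

-- ===== PORT B =====
-- B's end-of-iteration updates of the running min and of (max, second-max), as in Source B
def updLo (lo : Option Int) (v : Int) : Option Int :=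
  match lo with
  | none => some v
  | some m => if v < m then some v else some m

def updHi (hi hi2 : Option Int) (v : Int) : Option Int × Option Int :=
  match hi with
  | none => (some v, hi2)                              -- hi2 = hi (= None); hi = v
  | some M =>
    if M < v then (some v, some M)                     -- hi2 = hi; hi = v
    else if v < M then
      (some M, match hi2 with | none => some v | some h2 => if h2 < v then some v else some h2)
    else (some M, hi2)                                 -- v == hi: unchanged

-- the loop body of B; state = (res, cand, lo, hi, hi2): cand the set of seen values,
-- lo/hi their min/max, hi2 the largest seen value below hi
def stepB (st : List Int × List Int × Option Int × Option Int × Option Int) (v : Int) :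
    List Int × List Int × Option Int × Option Int × Option Int :=
  let res := st.1
  let cand := st.2.1
  let lo := st.2.2.1
  let hi := st.2.2.2.1
  let hi2 := st.2.2.2.2
  let out : Int :=
    match lo with
    | none => -1                      -- lo is None
    | some m =>
      if v ≤ m then -1                -- v <= lo
      else
        match hi with
        | some M =>
          if v = M then hi2.getD (-1)  -- v == hi
          else if M < v then M         -- hi < v
          else ((cand.filter (fun x => x < v)).max?).getD (-1)   -- max(filter(v.__gt__, cand), default=-1)
        | none => ((cand.filter (fun x => x < v)).max?).getD (-1)  -- unreachable: hi is set whenever lo is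
  (res ++ [out], PySem.Set.add cand v, updLo lo v, (updHi hi hi2 v).1, (updHi hi hi2 v).2)

def Smallestonleft_alt (arr : List Int) (_n : Int) : List Int :=
  (arr.foldl stepB ([], [], none, none, none)).1

-- ===== PRECONDITION & SPEC =====
def Spec_Smallestonleft (arr : List Int) (n : Int) (out : List Int) : Prop := out = Smallestonleft_alt arr n
instance (arr : List Int) (n : Int) (out : List Int) : Decidable (Spec_Smallestonleft arr n out) := by unfold Spec_Smallestonleft; infer_instance

-- ===== CLAIM (what is proved, stated in full; the proofs are below) =====
def Claim_equal_Smallestonleft : Prop := ∀ (arr : List Int) (n : Int), Dom_Smallestonleft arr n → Spec_Smallestonleft arr n (Smallestonleft arr n)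

-- ===== LEMMAS AND PROOFS =====

theorem mem_pyInsort {l : List Int} {v x : Int} : x ∈ pyInsort l v ↔ x ∈ l ∨ x = v := by
  induction l with
  | nil => simp [pyInsort]
  | cons h t ih =>
    simp only [pyInsort]
    split <;> simp [ih] <;> tauto

theorem sorted_pyInsort {l : List Int} {v : Int} (hs : l.Sorted (· ≤ ·)) :
    (pyInsort l v).Sorted (· ≤ ·) := by
  induction l with
  | nil => exact List.pairwise_singleton (· ≤ ·) v
  | cons h t ih =>
    simp only [List.sorted_cons] at hs
    simp only [pyInsort]
    split
    · rename_i hlt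
      refine List.sorted_cons.mpr ⟨?_, List.sorted_cons.mpr hs⟩
      intro b hb
      rcases List.mem_cons.mp hb with rfl | hb
      · exact le_of_lt hlt
      · exact le_trans (le_of_lt hlt) (hs.1 b hb)
    · rename_i hge
      refine List.sorted_cons.mpr ⟨?_, ih hs.2⟩
      intro b hb
      rcases mem_pyInsort.mp hb with hb | rfl
      · exact hs.1 b hb
      · omega

theorem pyBisectLeft_eq_zero {l : List Int} {v : Int} (hs : l.Sorted (· ≤ ·)) :
    pyBisectLeft l v = 0 ↔ ∀ x ∈ l, ¬ x < v := by
  cases l with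
  | nil => simp [pyBisectLeft]
  | cons h t =>
    simp only [pyBisectLeft]
    simp only [List.sorted_cons] at hs
    constructor
    · intro h0 x hx
      split at h0
      · omega
      · rename_i hnl
        rcases List.mem_cons.mp hx with rfl | hx
        · exact hnl
        · have := hs.1 x hx; omega
    · intro hall
      have := hall h (List.mem_cons_self ..)
      simp [this]

-- max? is determined by membership and the upper-bound property
theorem max?_eq_of_mem_iff {l₁ l₂ : List Int} (hm : ∀ x, x ∈ l₁ ↔ x ∈ l₂) :
    l₁.max? = l₂.max? := by
  cases h1 : l₁.max? with
  | none =>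
    rw [List.max?_eq_none_iff] at h1
    subst h1
    cases h2 : l₂.max? with
    | none => rfl
    | some b =>
      have := (List.max?_eq_some_iff.mp h2).1
      rw [← hm] at this
      simp at this
  | some a =>
    obtain ⟨ha, hb⟩ := List.max?_eq_some_iff.mp h1
    symm
    rw [List.max?_eq_some_iff]
    exact ⟨(hm a).mp ha, fun b hbm => hb b ((hm b).mpr hbm)⟩

theorem max?_cons_of_le {h : Int} {l : List Int} (hne : l ≠ []) (hle : ∀ x ∈ l, h ≤ x) :
    (h :: l).max? = l.max? := by
  cases hm : l.max? with
  | none => simp [List.max?_eq_none_iff.mp hm] at hne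
  | some a =>
    obtain ⟨ha, hb⟩ := List.max?_eq_some_iff.mp hm
    rw [List.max?_eq_some_iff]
    exact ⟨List.mem_cons_of_mem _ ha, fun b hbm => by
      rcases List.mem_cons.mp hbm with rfl | hbm
      · exact hle a ha
      · exact hb b hbm⟩

theorem min?_eq_of_mem_iff {l₁ l₂ : List Int} (hm : ∀ x, x ∈ l₁ ↔ x ∈ l₂) :
    l₁.min? = l₂.min? := by
  cases h1 : l₁.min? with
  | none =>
    rw [List.min?_eq_none_iff] at h1
    subst h1
    cases h2 : l₂.min? with
    | none => rfl
    | some b =>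
      have := (List.min?_eq_some_iff.mp h2).1
      rw [← hm] at this
      simp at this
  | some a =>
    obtain ⟨ha, hb⟩ := List.min?_eq_some_iff.mp h1
    symm
    rw [List.min?_eq_some_iff]
    exact ⟨(hm a).mp ha, fun b hbm => hb b ((hm b).mpr hbm)⟩

theorem min?_append_singleton (l : List Int) (v : Int) :
    (l ++ [v]).min? = some (match l.min? with | none => v | some m => min m v) := by
  induction l with
  | nil => simp
  | cons h t ih =>
    simp only [List.cons_append, List.min?_cons', ih]
    cases ht : t.min? <;> simp [ht, min_assoc]

theorem max?_append_singleton (l : List Int) (v : Int) :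
    (l ++ [v]).max? = some (match l.max? with | none => v | some M => max M v) := by
  induction l with
  | nil => simp
  | cons h t ih =>
    simp only [List.cons_append, List.max?_cons', ih]
    cases ht : t.max? <;> simp [ht, max_assoc]

theorem min?_add (cand : List Int) (v : Int) :
    (PySem.Set.add cand v).min? = (cand ++ [v]).min? :=
  min?_eq_of_mem_iff (fun x => by rw [PySem.Set.mem_add, List.mem_append]; simp)

theorem max?_add (cand : List Int) (v : Int) :
    (PySem.Set.add cand v).max? = (cand ++ [v]).max? :=
  max?_eq_of_mem_iff (fun x => by rw [PySem.Set.mem_add, List.mem_append]; simp)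

-- B's branches compute exactly the max of the candidates below v (or -1)
theorem stepB_val (cand : List Int) (v : Int) (hi2 : Option Int)
    (hh2 : hi2 = match cand.max? with
                 | none => none
                 | some M => (cand.filter (fun x => x < M)).max?) :
    (match cand.min? with
     | none => (-1 : Int)
     | some m =>
       if v ≤ m then -1
       else
         match cand.max? with
         | some M =>
           if v = M then hi2.getD (-1)
           else if M < v then M
           else ((cand.filter (fun x => x < v)).max?).getD (-1)
         | none => ((cand.filter (fun x => x < v)).max?).getD (-1))
    = ((cand.filter (fun x => x < v)).max?).getD (-1) := by
  cases hL : cand.min? with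
  | none =>
    rw [List.min?_eq_none_iff] at hL
    subst hL
    rfl
  | some m =>
    obtain ⟨hmem, hbd⟩ := List.min?_eq_some_iff.mp hL
    by_cases hvm : v ≤ m
    · have hfil : cand.filter (fun x => x < v) = [] := by
        rw [List.filter_eq_nil_iff]
        intro x hx
        have := hbd x hx
        simp; omega
      simp [hvm, hfil]
    · have hne : cand ≠ [] := fun h => by subst h; simp at hmem
      obtain ⟨M, hM⟩ : ∃ M, cand.max? = some M := by
        cases h : cand.max? with
        | none => rw [List.max?_eq_none_iff] at h; exact absurd h hne
        | some M => exact ⟨M, rfl⟩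
      rw [hM] at hh2
      obtain ⟨hMmem, hMbd⟩ := List.max?_eq_some_iff.mp hM
      by_cases hvM : v = M
      · subst hvM
        simp [hvm, hM, hh2]
      · by_cases hMv : M < v
        · have hfil : cand.filter (fun x => x < v) = cand :=
            List.filter_eq_self.mpr (fun x hx => by have := hMbd x hx; simp; omega)
          simp [hvm, hM, hvM, hMv, hfil]
        · simp [hvm, hM, hvM, hMv]

-- The crux: A's per-element step on a sorted list computes the max of the smaller elements (or -1)
theorem stepA_eq {l : List Int} (v : Int) (hs : l.Sorted (· ≤ ·)) :
    (if pyBisectLeft (pyInsort l v) v = 0 then (-1 : Int)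
     else ((pyInsort l v)[pyBisectLeft (pyInsort l v) v - 1]?).getD 0)
    = ((l.filter (fun x => x < v)).max?).getD (-1) := by
  induction l with
  | nil => simp [pyInsort, pyBisectLeft]
  | cons h t ih =>
    have hs' := List.sorted_cons.mp hs
    by_cases hvh : v < h
    · -- v inserted in front; nothing is < v
      have hfil : (h :: t).filter (fun x => x < v) = [] := by
        rw [List.filter_eq_nil_iff]
        intro x hx
        rcases List.mem_cons.mp hx with rfl | hx
        · simp; omega
        · have := hs'.1 x hx; simp; omega
      simp only [pyInsort, if_pos hvh, pyBisectLeft, hfil]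
      simp
    · -- h ≤ v: insort recurses into t
      have hhv : h ≤ v := by omega
      by_cases hhlt : h < v
      · -- h < v
        set L' := pyInsort t v with hL'
        have hj : pyBisectLeft (pyInsort (h :: t) v) v = pyBisectLeft L' v + 1 := by
          rw [show pyInsort (h :: t) v = h :: pyInsort t v from by simp [pyInsort, hvh]]
          simp only [pyBisectLeft, if_pos hhlt]
          rw [hL']
        have hsL' : L'.Sorted (· ≤ ·) := sorted_pyInsort hs'.2
        have hfil : (h :: t).filter (fun x => x < v) = h :: t.filter (fun x => x < v) := by
          simp [hhlt]
        by_cases hj0 : pyBisectLeft L' v = 0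
        · -- no element of t is < v
          have hnone : ∀ x ∈ t, ¬ x < v := by
            intro x hx
            exact (pyBisectLeft_eq_zero hsL').mp hj0 x (mem_pyInsort.mpr (Or.inl hx))
          have hft : t.filter (fun x => x < v) = [] := by
            rw [List.filter_eq_nil_iff]; intro x hx; simpa using hnone x hx
          simp only [pyInsort, if_neg hvh] at hj ⊢
          rw [hj, hj0]
          simp [hfil, hft]
        · -- some element of t is < v
          obtain ⟨k, hk⟩ : ∃ k, pyBisectLeft L' v = k + 1 := ⟨pyBisectLeft L' v - 1, by omega⟩
          have hft : t.filter (fun x => x < v) ≠ [] := by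
            intro hnil
            apply hj0
            rw [pyBisectLeft_eq_zero hsL']
            intro x hx
            rcases mem_pyInsort.mp hx with hx | rfl
            · have := List.filter_eq_nil_iff.mp hnil x hx; simpa using this
            · omega
          have hih := ih hs'.2
          rw [hk] at hih
          simp only [Nat.add_sub_cancel] at hih
          rw [if_neg (Nat.succ_ne_zero k)] at hih
          simp only [pyInsort, if_neg hvh] at hj ⊢
          rw [hj, hk]
          have hidx : (h :: L')[k + 1 + 1 - 1]? = L'[k]? := by simp
          rw [if_neg (by omega), hidx, hih, hfil,
            max?_cons_of_le hft (fun x hx => hs'.1 x (List.mem_of_mem_filter hx))]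
      · -- h = v (h ≤ v, ¬ h < v): bisect_left lands at index 0
        have hfil : (h :: t).filter (fun x => x < v) = [] := by
          rw [List.filter_eq_nil_iff]
          intro x hx
          rcases List.mem_cons.mp hx with rfl | hx
          · simp; omega
          · have := hs'.1 x hx; simp; omega
        simp only [pyInsort, if_neg hvh, pyBisectLeft, if_neg hhlt, hfil]
        simp

-- the second-max invariant, as a definition the lemmas can share
def hi2Inv (cand : List Int) (hi2 : Option Int) : Prop :=
  hi2 = (match cand.max? with
         | none => none
         | some M => (cand.filter (fun x => x < M)).max?)

theorem updLo_correct (cand : List Int) (v : Int) :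
    updLo cand.min? v = (PySem.Set.add cand v).min? := by
  rw [min?_add, min?_append_singleton]
  rcases hL : cand.min? with _ | m
  · rfl
  · simp only [updLo]
    by_cases h : v < m
    · simp [h, min_eq_right (le_of_lt h)]
    · simp [h, min_eq_left (by omega : m ≤ v)]

theorem updHi_correct (cand : List Int) (hi2 : Option Int) (v : Int) :
    (updHi cand.max? hi2 v).1 = (PySem.Set.add cand v).max? := by
  rw [max?_add, max?_append_singleton]
  rcases hH : cand.max? with _ | M
  · rfl
  · simp only [updHi]
    by_cases h : M < v
    · simp [h, max_eq_right (le_of_lt h)]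
    · by_cases h2 : v < M
      · simp [h, h2, max_eq_left (by omega : v ≤ M)]
      · simp [h, h2, max_eq_left (by omega : v ≤ M)]

-- maintenance of the second-max across one insertion
theorem hi2_maint (cand : List Int) (v : Int) (hi2 : Option Int)
    (hh2 : hi2Inv cand hi2) :
    hi2Inv (PySem.Set.add cand v) (updHi cand.max? hi2 v).2 := by
  unfold hi2Inv at hh2 ⊢
  have hCmax : (PySem.Set.add cand v).max? = (cand ++ [v]).max? := max?_add cand v
  rcases hM : cand.max? with _ | M
  · rw [List.max?_eq_none_iff] at hM
    subst hM
    rw [hh2]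
    simp [updHi, PySem.Set.add, PySem.Set.contains]
  · obtain ⟨hMmem, hMbd⟩ := List.max?_eq_some_iff.mp hM
    rw [hM] at hh2
    rw [hCmax, max?_append_singleton, hM]
    simp only [updHi]
    by_cases h1 : M < v
    · -- new max is v; new second-max = old max M
      have hmv : max M v = v := max_eq_right (le_of_lt h1)
      rw [if_pos h1]
      simp only [hmv]
      have : ((PySem.Set.add cand v).filter (fun x => x < v)).max? = cand.max? := by
        apply max?_eq_of_mem_iff
        intro x
        simp only [List.mem_filter, PySem.Set.mem_add, decide_eq_true_eq]
        constructor
        · rintro ⟨hx | rfl, hlt⟩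
          · exact hx
          · omega
        · intro hx
          exact ⟨Or.inl hx, by have := hMbd x hx; simp; omega⟩
      rw [this, hM]
    · by_cases h2 : v < M
      · -- max stays M; v joins the candidates below M
        have hmv : max M v = M := max_eq_left (le_of_lt h2)
        rw [if_neg h1, if_pos h2]
        simp only [hmv]
        have hmm : ((PySem.Set.add cand v).filter (fun x => x < M)).max?
            = ((cand.filter (fun x => x < M)) ++ [v]).max? := by
          apply max?_eq_of_mem_iff
          intro x
          simp only [List.mem_filter, PySem.Set.mem_add, List.mem_append,
            List.mem_singleton, decide_eq_true_eq]
          constructor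
          · rintro ⟨hx | rfl, hlt⟩
            · exact Or.inl ⟨hx, by simpa using hlt⟩
            · exact Or.inr rfl
          · rintro (⟨hx, hlt⟩ | rfl)
            · exact ⟨Or.inl hx, by simpa using hlt⟩
            · exact ⟨Or.inr rfl, by omega⟩
        have hh2' : hi2 = (List.filter (fun x => decide (x < M)) cand).max? := hh2
        rw [hmm, max?_append_singleton, ← hh2']
        rcases hi2 with _ | h2v
        · rfl
        · by_cases h3 : h2v < v
          · simp [h3, max_eq_right (le_of_lt h3)]
          · simp [h3, max_eq_left (by omega : v ≤ h2v)]
      · -- v = M: everything unchanged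
        have hmv : max M v = M := max_eq_left (by omega)
        rw [if_neg h1, if_neg h2]
        simp only [hmv]
        show hi2 = _
        have hh2' : hi2 = (List.filter (fun x => decide (x < M)) cand).max? := hh2
        rw [hh2']
        apply max?_eq_of_mem_iff
        intro x
        simp only [List.mem_filter, PySem.Set.mem_add, decide_eq_true_eq]
        constructor
        · rintro ⟨hx, hlt⟩
          exact ⟨Or.inl hx, hlt⟩
        · rintro ⟨hx | rfl, hlt⟩
          · exact ⟨hx, hlt⟩
          · omega

theorem loop_eq : ∀ (arr listo cand res : List Int) (lo hi hi2 : Option Int),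
    listo.Sorted (· ≤ ·) → (∀ x, x ∈ listo ↔ x ∈ cand) →
    lo = cand.min? → hi = cand.max? → hi2Inv cand hi2 →
    (arr.foldl stepA (res, listo)).1 = (arr.foldl stepB (res, cand, lo, hi, hi2)).1 := by
  intro arr
  induction arr with
  | nil => intro _ _ _ _ _ _ _ _ _ _ _; rfl
  | cons v rest ih =>
    intro listo cand res lo hi hi2 hs hm hlo hhi hh2
    subst hlo
    subst hhi
    simp only [List.foldl_cons]
    have hmax : ((listo.filter (fun x => x < v)).max?) = ((cand.filter (fun x => x < v)).max?) := by
      apply max?_eq_of_mem_iff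
      intro x
      simp only [List.mem_filter]
      constructor
      · rintro ⟨hx, hlt⟩; exact ⟨(hm x).mp hx, hlt⟩
      · rintro ⟨hx, hlt⟩; exact ⟨(hm x).mpr hx, hlt⟩
    have hstep := stepA_eq v hs
    rw [hmax] at hstep
    have hA : stepA (res, listo) v
        = (res ++ [((cand.filter (fun x => x < v)).max?).getD (-1)], pyInsort listo v) := by
      simp only [stepA]
      split
      · rename_i h0
        rw [if_pos h0] at hstep
        rw [← hstep]
      · rename_i h0
        rw [if_neg h0] at hstep
        rw [← hstep]
    have hB : stepB (res, cand, cand.min?, cand.max?, hi2) v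
        = (res ++ [((cand.filter (fun x => x < v)).max?).getD (-1)], PySem.Set.add cand v,
           updLo cand.min? v, (updHi cand.max? hi2 v).1, (updHi cand.max? hi2 v).2) := by
      simp only [stepB]
      rw [stepB_val cand v hi2 hh2]
    rw [hA, hB]
    rw [updLo_correct, updHi_correct]
    exact ih (pyInsort listo v) (PySem.Set.add cand v) _ _ _ _
      (sorted_pyInsort hs)
      (fun x => by rw [mem_pyInsort, PySem.Set.mem_add]; simp [hm x])
      rfl rfl (hi2_maint cand v hi2 hh2)

-- ===== VERDICT (by name: the statement is the Claim_ definition above) =====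
theorem Smallestonleft_spec : Claim_equal_Smallestonleft := by
  intro arr n _
  unfold Spec_Smallestonleft Smallestonleft Smallestonleft_alt
  exact loop_eq arr [] [] [] none none none List.sorted_nil (fun x => Iff.rfl) rfl rfl rfl
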